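-- pv_equiv track=rewrite | github.com/eparian314-collab/discord_bot | fun_bot/games/pokemon_data_manager.py | _apply_experience
-- ===== SOURCE A (Python) =====
-- from typing import Any, Dict, Iterable, List, Optional, Tuple
--
-- MAX_POKEMON_LEVEL = 100
--
-- def _apply_experience(
--     level: int,
--     experience: int,
--     xp_gain: int,
-- ) -> Tuple[int, int]:
--     """Apply XP gain, respecting MAX_POKEMON_LEVEL.
--
--     Uses a simple 100 XP per level curve and clears XP at max level.
--     """
--
--     level = max(1, min(int(level), MAX_POKEMON_LEVEL))
--     experience = max(0, int(experience))
--     xp_gain = max(0, int(xp_gain))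
--
--     while xp_gain > 0 and level < MAX_POKEMON_LEVEL:
--         needed = 100 - experience
--         if xp_gain >= needed:
--             xp_gain -= needed
--             level += 1
--             experience = 0
--         else:
--             experience += xp_gain
--             xp_gain = 0
--
--     if level >= MAX_POKEMON_LEVEL:
--         level = MAX_POKEMON_LEVEL
--         experience = 0
--
--     return level, experience
-- ===== SOURCE B (Python) =====
-- MAX_POKEMON_LEVEL = 100
--
-- def _apply_experience(level, experience, xp_gain):
--     """Closed-form XP application: one divmod instead of the per-level loop."""
--     level = max(1, min(int(level), MAX_POKEMON_LEVEL))
--     experience = max(0, int(experience))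
--     xp_gain = max(0, int(xp_gain))
--     if xp_gain > 0 and level < MAX_POKEMON_LEVEL:
--         total = experience + xp_gain
--         level += total // 100
--         experience = total % 100
--     if level >= MAX_POKEMON_LEVEL:
--         level = MAX_POKEMON_LEVEL
--         experience = 0
--     return level, experience
-- ===== Notes on version B (the rewrite author's own statement) =====
-- stated objective: simpler
-- what changed: Replaced A's per-level while-loop (one iteration per level gained) with a single closed-form divmod of the combined XP total, keeping the identical clamping and max-level guard.
import Mathlib
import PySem

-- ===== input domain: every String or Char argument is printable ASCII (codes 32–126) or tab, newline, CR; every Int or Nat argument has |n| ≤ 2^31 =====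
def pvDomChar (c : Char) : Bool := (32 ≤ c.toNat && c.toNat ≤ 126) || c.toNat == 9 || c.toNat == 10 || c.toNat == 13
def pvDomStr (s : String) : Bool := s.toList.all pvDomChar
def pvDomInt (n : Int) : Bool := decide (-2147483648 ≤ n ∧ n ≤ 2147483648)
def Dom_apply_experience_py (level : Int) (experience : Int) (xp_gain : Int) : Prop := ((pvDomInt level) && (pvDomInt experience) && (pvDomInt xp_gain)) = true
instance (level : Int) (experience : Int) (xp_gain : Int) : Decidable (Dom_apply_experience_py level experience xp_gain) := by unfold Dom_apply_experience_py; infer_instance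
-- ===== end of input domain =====

-- B replaces A's per-level while-loop by one closed-form divmod; same return value (objective: simpler).

-- ===== PORT A =====
-- the while-loop of A; terminates because each iteration either increments level (< 100) or sets xp_gain to 0
def applyExpLoopA (level : Int) (experience : Int) (xp_gain : Int) : Int × Int :=
  if xp_gain > 0 ∧ level < 100 then
    let needed := 100 - experience
    if xp_gain ≥ needed then
      applyExpLoopA (level + 1) 0 (xp_gain - needed)
    else
      (level, experience + xp_gain)   -- xp_gain becomes 0, so the loop exits with this state
  else
    (level, experience)
termination_by (100 - level).toNat
decreasing_by omega

def apply_experience_py (level : Int) (experience : Int) (xp_gain : Int) : Int × Int :=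
  let level := max 1 (min level 100)
  let experience := max 0 experience
  let xp_gain := max 0 xp_gain
  let r := applyExpLoopA level experience xp_gain
  if r.1 ≥ 100 then (100, 0) else r

-- ===== PORT B =====
def apply_experience_py_alt (level : Int) (experience : Int) (xp_gain : Int) : Int × Int :=
  let level := max 1 (min level 100)
  let experience := max 0 experience
  let xp_gain := max 0 xp_gain
  let p :=
    if xp_gain > 0 ∧ level < 100 then
      let total := experience + xp_gain
      (level + PySem.Int.floordiv total 100, PySem.Int.mod total 100)
    else (level, experience)
  if p.1 ≥ 100 then (100, 0) else p

-- ===== PRECONDITION & SPEC =====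
def Spec_apply_experience_py (level : Int) (experience : Int) (xp_gain : Int) (out : Int × Int) : Prop := out = apply_experience_py_alt level experience xp_gain
instance (level : Int) (experience : Int) (xp_gain : Int) (out : Int × Int) : Decidable (Spec_apply_experience_py level experience xp_gain out) := by unfold Spec_apply_experience_py; infer_instance

-- ===== CLAIM (what is proved, stated in full; the proofs are below) =====
def Claim_equal_apply_experience_py : Prop := ∀ (level : Int) (experience : Int) (xp_gain : Int), Dom_apply_experience_py level experience xp_gain → Spec_apply_experience_py level experience xp_gain (apply_experience_py level experience xp_gain)

-- ===== LEMMAS AND PROOFS =====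

-- closed-form characterisation of the loop followed by the cap guard
theorem applyExpLoopA_closed (level experience xp_gain : Int)
    (hl : level < 100) (he : 0 ≤ experience) (hg : 0 < xp_gain) :
    (if (applyExpLoopA level experience xp_gain).1 ≥ 100 then ((100 : Int), (0 : Int))
     else applyExpLoopA level experience xp_gain) =
    (if level + (experience + xp_gain) / 100 ≥ 100 then ((100 : Int), (0 : Int))
     else (level + (experience + xp_gain) / 100, (experience + xp_gain) % 100)) := by
  generalize hk : (100 - level).toNat = k
  induction k generalizing level experience xp_gain with
  | zero => omega
  | succ n ih =>
    have hc : xp_gain > 0 ∧ level < 100 := ⟨hg, hl⟩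
    rw [applyExpLoopA, if_pos hc]
    by_cases hb : xp_gain ≥ 100 - experience
    · simp only [if_pos hb]
      by_cases hrec : 0 < xp_gain - (100 - experience) ∧ level + 1 < 100
      · have := ih (level + 1) 0 (xp_gain - (100 - experience)) hrec.2 le_rfl hrec.1 (by omega)
        rw [this]
        have h1 : (0 : Int) + (xp_gain - (100 - experience)) = experience + xp_gain - 100 := by ring
        rw [h1]
        have h2 : (experience + xp_gain - 100) / 100 = (experience + xp_gain) / 100 - 1 := by omega
        have h3 : (experience + xp_gain - 100) % 100 = (experience + xp_gain) % 100 := by omega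
        rw [h2, h3]
        split_ifs <;> simp only [Prod.mk.injEq, and_true] <;> omega
      · -- the recursive call stops immediately: leftover xp is 0 or the level cap is reached
        rw [applyExpLoopA,
          if_neg (show ¬(xp_gain - (100 - experience) > 0 ∧ level + 1 < 100) by omega)]
        split_ifs <;> simp only [Prod.mk.injEq, and_true] <;> omega
    · simp only [if_neg hb]
      split_ifs <;> simp only [Prod.mk.injEq] <;> omega

-- ===== VERDICT (by name: the statement is the Claim_ definition above) =====
theorem apply_experience_py_spec : Claim_equal_apply_experience_py := by
  intro level experience xp_gain _
  unfold Spec_apply_experience_py apply_experience_py apply_experience_py_alt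
  set L := max 1 (min level 100) with hL
  set E := max 0 experience with hE
  set G := max 0 xp_gain with hG
  have hL1 : 1 ≤ L := le_max_left _ _
  have hL2 : L ≤ 100 := by
    have := min_le_right level 100; omega
  have hE0 : 0 ≤ E := le_max_left _ _
  have hG0 : 0 ≤ G := le_max_left _ _
  by_cases hcond : G > 0 ∧ L < 100
  · simp only [if_pos hcond]
    have := applyExpLoopA_closed L E G hcond.2 hE0 hcond.1
    rw [this]
    rw [PySem.Int.floordiv_eq_ediv_of_pos (by norm_num), PySem.Int.mod_eq_emod_of_pos (by norm_num)]
  · simp only [if_neg hcond]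
    rw [applyExpLoopA, if_neg hcond]
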